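-- pv_equiv track=rewrite | github.com/Beliavsky/Python-scripts-for-Fortran | xmerge_fortran_declarations.py | _wrap_decl
-- ===== SOURCE A (Python) =====
-- from typing import List, Optional, Tuple
--
-- def _wrap_decl(
--     indent: str,
--     lhs_exact: str,
--     items: List[str],
--     width: int = 80,
--     cont_extra_indent: int = 3,
-- ) -> List[str]:
--     """
--     Wrap a declaration to width, maximizing fill on each continued line.
--     Continued physical lines end with ', &' and are followed by a continuation line.
--     """
--     first_prefix = f"{indent}{lhs_exact} :: "
--     cont_prefix = indent + (" " * cont_extra_indent)
--
--     out_lines: List[str] = []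
--     remaining = items[:]
--     first = True
--
--     while remaining:
--         prefix = first_prefix if first else cont_prefix
--
--         line_items: List[str] = []
--         # greedily add items based on content width (without ', &')
--         while remaining:
--             candidate_items = line_items + [remaining[0]]
--             candidate = prefix + ", ".join(candidate_items)
--             if len(candidate) <= width or not line_items:
--                 # accept if fits, or if it's the first item on the line (even if too long)
--                 line_items.append(remaining.pop(0))
--                 # if we just accepted an overlong single item, stop
--                 if len(prefix + ", ".join(line_items)) > width and len(line_items) == 1:
--                     break
--             else:
--                 break
--
--         line = prefix + ", ".join(line_items)
--
--         # if more items remain, we must add ', &' to this line; backtrack if needed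
--         if remaining:
--             cont_suffix = ", &"
--             if len(line) + len(cont_suffix) > width:
--                 # move items from the end of this line to the front of remaining
--                 while len(line_items) > 1 and len(line) + len(cont_suffix) > width:
--                     remaining.insert(0, line_items.pop())
--                     line = prefix + ", ".join(line_items)
--             line = line + cont_suffix
--
--         out_lines.append(line)
--         first = False
--
--     return out_lines
-- ===== SOURCE B (Python) =====
-- from typing import List, Tuple
--
--
-- def _wrap_decl(
--     indent: str,
--     lhs_exact: str,
--     items: List[str],
--     width: int = 80,
--     cont_extra_indent: int = 3,
-- ) -> List[str]:
--     """
--     Wrap a declaration to width, maximizing fill on each continued line.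
--     Table-driven: pass 1 computes the break points from item LENGTHS only
--     (no candidate strings, no backtracking); pass 2 renders the lines.
--     """
--     first_prefix = f"{indent}{lhs_exact} :: "
--     cont_prefix = indent + (" " * cont_extra_indent)
--     lens = [len(s) for s in items]
--
--     def take_line(plen: int, ls: List[int]) -> Tuple[int, bool]:
--         # how many of the remaining items (lengths ls) go on this line,
--         # and whether a ', &' continuation suffix follows
--         total = plen + sum(ls) + 2 * (len(ls) - 1)
--         if len(ls) == 1 or total <= width:
--             return len(ls), False
--         acc = plen + ls[0]
--         k = 1
--         for l in ls[1:]: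
--             if width < acc + 2 + l + 3:
--                 break
--             acc += 2 + l
--             k += 1
--         return k, True
--
--     # pass 1: segment sizes
--     counts: List[Tuple[int, bool]] = []
--     rest, plen = lens, len(first_prefix)
--     while rest:
--         k, cont = take_line(plen, rest)
--         counts.append((k, cont))
--         rest, plen = rest[k:], len(cont_prefix)
--
--     # pass 2: render
--     out: List[str] = []
--     rem, prefix = items, first_prefix
--     for k, cont in counts:
--         line = prefix + ", ".join(rem[:k])
--         out.append(line + ", &" if cont else line)
--         rem, prefix = rem[k:], cont_prefix
--     return out
-- ===== Notes on version B (the rewrite author's own statement) =====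
-- stated objective: alternative
-- what changed: A's interleaved greedy fill with string-building and pop/insert backtracking per line is replaced by a table-driven two-pass algorithm: pass 1 computes the break points (item count and continuation flag per line) purely from precomputed item lengths with no candidate strings and no backtracking, pass 2 renders each line once.
import Mathlib
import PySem

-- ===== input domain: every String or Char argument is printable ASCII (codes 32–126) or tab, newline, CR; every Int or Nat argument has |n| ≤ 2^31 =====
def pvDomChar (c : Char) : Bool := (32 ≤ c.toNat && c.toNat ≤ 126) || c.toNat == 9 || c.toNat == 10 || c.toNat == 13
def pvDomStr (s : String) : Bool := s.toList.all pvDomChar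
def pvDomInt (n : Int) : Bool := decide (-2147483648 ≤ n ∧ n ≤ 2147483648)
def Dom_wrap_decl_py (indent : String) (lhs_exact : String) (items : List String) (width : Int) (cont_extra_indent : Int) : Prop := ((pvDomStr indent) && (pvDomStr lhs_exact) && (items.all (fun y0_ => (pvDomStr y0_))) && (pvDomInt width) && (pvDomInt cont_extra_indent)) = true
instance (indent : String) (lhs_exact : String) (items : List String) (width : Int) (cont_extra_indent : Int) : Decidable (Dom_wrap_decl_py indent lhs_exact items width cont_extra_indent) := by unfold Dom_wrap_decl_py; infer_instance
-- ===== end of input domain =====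

-- B re-implements A's greedy wrap-with-backtracking as a table-driven two-pass algorithm:
-- pass 1 finds the break points from the item LENGTHS alone, pass 2 renders the lines
-- (objective: alternative decomposition, same return value; A does not observably mutate its input).

-- ===== PORT A =====
-- Both Pythons use ", ".join(...); ported on List Char (strings are handled as code-point lists throughout).
def wdJoin (xs : List (List Char)) : List Char := PySem.Chars.join [',', ' '] xs

-- inner `while remaining:` greedy loop of A (line_items, remaining as state)
def wdInner (width : Int) (pfx : List Char) (lineItems remaining : List (List Char)) :
    List (List Char) × List (List Char) :=
  match remaining with
  | [] => (lineItems, [])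
  | r :: rest =>
    let candidate := pfx ++ wdJoin (lineItems ++ [r])
    if ((candidate.length : Int) ≤ width) ∨ lineItems.isEmpty then
      let li := lineItems ++ [r]
      if (width < (((pfx ++ wdJoin li).length : Int))) ∧ li.length = 1 then
        (li, rest)
      else wdInner width pfx li rest
    else (lineItems, remaining)

-- backtracking `while len(line_items) > 1 and len(line) + len(cont_suffix) > width:` loop of A
-- (the Python `if` wrapping this while repeats the loop guard, so the loop alone is its meaning);
-- `line_items.pop()` / `remaining.insert(0, …)` become dropLast / getLast? consed in front.
def wdBack (width : Int) (pfx : List Char) (lineItems : List (List Char)) (line : List Char)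
    (remaining : List (List Char)) : List Char × List (List Char) :=
  if 1 < lineItems.length ∧ width < (line.length : Int) + 3 then
    let li := lineItems.dropLast
    wdBack width pfx li (pfx ++ wdJoin li) (lineItems.getLast?.toList ++ remaining)
  else (line, remaining)
termination_by lineItems.length
decreasing_by rename_i h; simp [List.length_dropLast]; omega

-- one iteration of A's outer loop: produces the physical line and the new `remaining`
def wdStep (width : Int) (pfx : List Char) (remaining : List (List Char)) :
    List Char × List (List Char) :=
  let p := wdInner width pfx [] remaining
  let line := pfx ++ wdJoin p.1
  if p.2.isEmpty then (line, p.2)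
  else
    let q := wdBack width pfx p.1 line p.2
    (q.1 ++ [',', ' ', '&'], q.2)

-- termination lemmas for the outer loop (cited by `decreasing_by` below)
theorem wdInner_sizes (width : Int) (pfx : List Char) :
    ∀ (remaining lineItems : List (List Char)),
      (wdInner width pfx lineItems remaining).1.length +
        (wdInner width pfx lineItems remaining).2.length = lineItems.length + remaining.length ∧
      lineItems.length ≤ (wdInner width pfx lineItems remaining).1.length := by
  intro remaining
  induction remaining with
  | nil => intro li; simp [wdInner]
  | cons r rest ih =>
    intro li
    simp only [wdInner]
    split
    · split
      · simp; omega
      · have := ih (li ++ [r]); simp at this ⊢; omega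
    · simp

theorem wdBack_sizes (width : Int) (pfx : List Char) (li : List (List Char)) (line : List Char)
    (remaining : List (List Char)) :
      1 ≤ li.length →
      (wdBack width pfx li line remaining).2.length ≤
        li.length - 1 + remaining.length := by
  fun_induction wdBack with
  | case1 li line rem h li' ih =>
    intro _
    have hne : li ≠ [] := by intro e; subst e; simp at h
    obtain ⟨x, hx⟩ := Option.isSome_iff_exists.mp (List.getLast?_isSome.mpr hne)
    have hlen' : li'.length = li.length - 1 := by simp [li', List.length_dropLast]
    have h2 : 2 ≤ li.length := h.1
    have := ih (by omega)
    simp [hx] at this ⊢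
    omega
  | case2 => intro h; simp

theorem wdStep_len (width : Int) (pfx : List Char) (remaining : List (List Char))
    (h : remaining ≠ []) : (wdStep width pfx remaining).2.length < remaining.length := by
  obtain ⟨r, rest, rfl⟩ := List.exists_cons_of_ne_nil h
  have hs := wdInner_sizes width pfx (r :: rest) []
  have hpos : 1 ≤ (wdInner width pfx [] (r :: rest)).1.length := by
    rw [wdInner]
    simp only [List.isEmpty_nil, List.nil_append]
    split
    · split
      · simp
      · have := (wdInner_sizes width pfx rest [r]).2; simpa using this
    · simp at *
  simp only [wdStep]
  split
  · rename_i hemp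
    simp at hs hemp ⊢
    omega
  · have hb := wdBack_sizes width pfx (wdInner width pfx [] (r :: rest)).1
      (pfx ++ wdJoin (wdInner width pfx [] (r :: rest)).1) (wdInner width pfx [] (r :: rest)).2 hpos
    simp at hs ⊢
    omega

-- `while remaining:` outer loop of A, accumulating out_lines
def wdOuter (width : Int) (firstPrefix contPrefix : List Char) (remaining : List (List Char))
    (first : Bool) (outLines : List (List Char)) : List (List Char) :=
  match remaining with
  | [] => outLines
  | r :: rest =>
    let s := wdStep width (if first then firstPrefix else contPrefix) (r :: rest)
    wdOuter width firstPrefix contPrefix s.2 false (outLines ++ [s.1])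
termination_by remaining.length
decreasing_by exact wdStep_len _ _ _ (by simp)

def wrap_decl_py (indent : String) (lhs_exact : String) (items : List String) (width : Int)
    (cont_extra_indent : Int) : List String :=
  -- f"{indent}{lhs_exact} :: " and indent + " " * cont_extra_indent (negative repeat = empty, as in Python)
  let firstPrefix := indent.toList ++ lhs_exact.toList ++ [' ', ':', ':', ' ']
  let contPrefix := indent.toList ++ List.replicate cont_extra_indent.toNat ' '
  (wdOuter width firstPrefix contPrefix (items.map String.toList) true []).map String.ofList

-- ===== PORT B =====
-- the `for l in ls[1:]` extension loop of take_line
def wdTakeGo (width : Int) (acc : Int) (k : Nat) (ls : List Int) : Nat :=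
  match ls with
  | [] => k
  | l :: t => if width < acc + 2 + l + 3 then k else wdTakeGo width (acc + 2 + l) (k + 1) t

-- take_line(plen, ls): (number of items on this line, whether ', &' follows)
def wdTakeLine (width : Int) (plen : Int) (ls : List Int) : Nat × Bool :=
  if ls.length = 1 ∨ plen + ls.sum + 2 * ((ls.length : Int) - 1) ≤ width then (ls.length, false)
  else
    match ls with
    | [] => (0, false)  -- unreachable: pass 1 only calls take_line on a nonempty rest
    | l :: t => (wdTakeGo width (plen + l) 1 t, true)

theorem wdTakeGo_ge (width : Int) :
    ∀ (ls : List Int) (acc : Int) (k : Nat), k ≤ wdTakeGo width acc k ls := by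
  intro ls
  induction ls with
  | nil => intro acc k; simp [wdTakeGo]
  | cons l t ih =>
    intro acc k
    simp only [wdTakeGo]
    split
    · exact le_refl _
    · exact le_trans (Nat.le_succ k) (ih _ _)

theorem wdTakeLine_pos (width plen : Int) (ls : List Int) (h : ls ≠ []) :
    1 ≤ (wdTakeLine width plen ls).1 := by
  rw [wdTakeLine.eq_def]
  split
  · simpa using List.length_pos_iff.mpr h
  · match ls, h with
    | l :: t, _ => exact wdTakeGo_ge width t (plen + l) 1

-- pass 1: the `while rest:` loop computing the (count, continuation?) table
def wdPass1 (width contPlen : Int) (plen : Int) (rest : List Int) : List (Nat × Bool) :=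
  if h : rest = [] then []
  else
    let kc := wdTakeLine width plen rest
    kc :: wdPass1 width contPlen contPlen (rest.drop kc.1)
termination_by rest.length
decreasing_by
  have h1 := wdTakeLine_pos width plen rest h
  have h2 : 1 ≤ rest.length := List.length_pos_iff.mpr h
  simp only [List.length_drop]
  omega

-- pass 2: the rendering `for k, cont in counts:` loop
def wdPass2 (contPrefix : List Char) (counts : List (Nat × Bool)) (rem : List (List Char))
    (pfx : List Char) : List (List Char) :=
  match counts with
  | [] => []
  | kc :: cs =>
    let line := pfx ++ wdJoin (rem.take kc.1)
    (if kc.2 then line ++ [',', ' ', '&'] else line) :: wdPass2 contPrefix cs (rem.drop kc.1) contPrefix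

def wrap_decl_py_alt (indent : String) (lhs_exact : String) (items : List String) (width : Int)
    (cont_extra_indent : Int) : List String :=
  let firstPrefix := indent.toList ++ lhs_exact.toList ++ [' ', ':', ':', ' ']
  let contPrefix := indent.toList ++ List.replicate cont_extra_indent.toNat ' '
  let lens := items.map (fun s => (s.toList.length : Int))
  let counts := wdPass1 width (contPrefix.length : Int) (firstPrefix.length : Int) lens
  (wdPass2 contPrefix counts (items.map String.toList) firstPrefix).map String.ofList

-- ===== PRECONDITION & SPEC =====
def Spec_wrap_decl_py (indent : String) (lhs_exact : String) (items : List String) (width : Int) (cont_extra_indent : Int) (out : List String) : Prop := out = wrap_decl_py_alt indent lhs_exact items width cont_extra_indent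
instance (indent : String) (lhs_exact : String) (items : List String) (width : Int) (cont_extra_indent : Int) (out : List String) : Decidable (Spec_wrap_decl_py indent lhs_exact items width cont_extra_indent out) := by unfold Spec_wrap_decl_py; infer_instance

-- ===== CLAIM (what is proved, stated in full; the proofs are below) =====
def Claim_equal_wrap_decl_py : Prop := ∀ (indent : String) (lhs_exact : String) (items : List String) (width : Int) (cont_extra_indent : Int), Dom_wrap_decl_py indent lhs_exact items width cont_extra_indent → Spec_wrap_decl_py indent lhs_exact items width cont_extra_indent (wrap_decl_py indent lhs_exact items width cont_extra_indent)

-- ===== LEMMAS AND PROOFS =====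

-- helpers (proofs only)
def Jval (pL : Int) (lens : List Int) (k : Nat) : Int :=
  pL + (lens.take k).sum + 2 * ((k : Int) - 1)

theorem wdJoin_snoc (xs : List (List Char)) (r : List Char) (h : xs ≠ []) :
    wdJoin (xs ++ [r]) = wdJoin xs ++ [',', ' '] ++ r := by
  induction xs with
  | nil => simp at h
  | cons a t ih =>
    cases t with
    | nil => simp [wdJoin, PySem.Chars.join_cons_cons, PySem.Chars.join_singleton]
    | cons b t' =>
      have := ih (by simp)
      simp only [wdJoin, List.cons_append, PySem.Chars.join_cons_cons] at this ⊢
      simp [this]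

theorem wdJoin_len (xs : List (List Char)) (h : xs ≠ []) :
    ((wdJoin xs).length : Int) =
      (xs.map (fun s => (s.length : Int))).sum + 2 * ((xs.length : Int) - 1) := by
  induction xs with
  | nil => simp at h
  | cons a t ih =>
    cases t with
    | nil => simp [wdJoin, PySem.Chars.join_singleton]
    | cons b t' =>
      have := ih (by simp)
      simp only [wdJoin, PySem.Chars.join_cons_cons] at this ⊢
      simp at this ⊢
      push_cast at this ⊢
      omega

theorem line_len (pfx : List Char) (rem : List (List Char)) (k : Nat)
    (hk1 : 1 ≤ k) (hkn : k ≤ rem.length) :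
    (((pfx ++ wdJoin (rem.take k)).length : Int)) =
      Jval (pfx.length : Int) (rem.map (fun s => (s.length : Int))) k := by
  have hne : rem.take k ≠ [] := by
    intro e
    rcases List.take_eq_nil_iff.mp e with h' | h'
    · omega
    · subst h'; simp at hkn; omega
  have hmin : min (k:Int) (rem.length:Int) = k := by omega
  simp [Jval, wdJoin_len _ hne, List.map_take, List.length_take]
  push_cast
  rw [hmin]
  ring
def innerCount (w cur : Int) (ls : List Int) : Nat :=
  match ls with
  | [] => 0
  | l :: t => if cur + 2 + l ≤ w then 1 + innerCount w (cur + 2 + l) t else 0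

theorem snoc_len (pfx : List Char) (li : List (List Char)) (r : List Char) (h : li ≠ []) :
    (((pfx ++ wdJoin (li ++ [r])).length : Int)) =
      ((pfx ++ wdJoin li).length : Int) + 2 + (r.length : Int) := by
  rw [wdJoin_snoc _ _ h]
  simp
  push_cast
  ring

theorem inner_spec (w : Int) (pfx : List Char) :
    ∀ (rest : List (List Char)) (li : List (List Char)), li ≠ [] →
      (((pfx ++ wdJoin li).length : Int)) ≤ w →
      wdInner w pfx li rest =
        (li ++ rest.take (innerCount w ((pfx ++ wdJoin li).length : Int)
            (rest.map (fun s => (s.length : Int)))),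
         rest.drop (innerCount w ((pfx ++ wdJoin li).length : Int)
            (rest.map (fun s => (s.length : Int))))) := by
  intro rest
  induction rest with
  | nil => intro li h1 h2; simp [wdInner, innerCount]
  | cons r t ih =>
    intro li h1 h2
    rw [wdInner]
    simp only [List.map_cons, innerCount]
    rw [snoc_len pfx li r h1]
    by_cases hc : ((pfx ++ wdJoin li).length : Int) + 2 + (r.length : Int) ≤ w
    · rw [if_pos (Or.inl hc), if_pos hc,
        if_neg (by intro ⟨h3, _⟩; omega)]
      have ih' := ih (li ++ [r]) (by simp) (by rw [snoc_len pfx li r h1]; omega)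
      rw [snoc_len pfx li r h1] at ih'
      rw [ih']
      simp [Nat.add_comm 1]
    · have hemp : li.isEmpty = false := by simp; exact h1
      rw [if_neg (by simp only [hemp, Bool.false_eq_true, or_false]; omega), if_neg (by omega)]
      simp

-- the count A's inner loop takes from `rem` (first item always accepted)
def innerTotal (w pL : Int) (lens : List Int) : Nat :=
  match lens with
  | [] => 1
  | l :: t => if w < pL + l then 1 else 1 + innerCount w (pL + l) t

theorem inner_top (w : Int) (pfx : List Char) (x : List Char) (rest : List (List Char)) :
    wdInner w pfx [] (x :: rest) =
      ((x :: rest).take (innerTotal w (pfx.length : Int)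
          ((x :: rest).map (fun s => (s.length : Int)))),
       (x :: rest).drop (innerTotal w (pfx.length : Int)
          ((x :: rest).map (fun s => (s.length : Int))))) := by
  have hJ : (((pfx ++ wdJoin [x]).length : Int)) = (pfx.length : Int) + (x.length : Int) := by
    simp [wdJoin, PySem.Chars.join_singleton]
  rw [wdInner]
  simp only [List.nil_append, List.map_cons, innerTotal]
  rw [if_pos (by simp)]
  by_cases hb : w < (pfx.length : Int) + (x.length : Int)
  · rw [if_pos ⟨by rw [hJ]; exact hb, by simp⟩, if_pos hb]
    simp
  · rw [if_neg (by intro ⟨h3, _⟩; rw [hJ] at h3; exact hb h3), if_neg hb]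
    rw [inner_spec w pfx rest [x] (by simp) (by rw [hJ]; omega), hJ]
    simp [Nat.add_comm 1]

theorem take_sum_mono (lens : List Int) (h : ∀ l ∈ lens, 0 ≤ l) {j k : Nat} (hjk : j ≤ k) :
    (lens.take j).sum ≤ (lens.take k).sum := by
  have : lens.take k = lens.take j ++ (lens.drop j).take (k - j) := by
    rw [← List.take_add]
    congr 1
    omega
  rw [this, List.sum_append]
  have : 0 ≤ ((lens.drop j).take (k - j)).sum :=
    List.sum_nonneg (fun l hl => h l (List.mem_of_mem_drop (List.mem_of_mem_take hl)))
  omega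

theorem Jval_mono (pL : Int) (lens : List Int) (h : ∀ l ∈ lens, 0 ≤ l) {j k : Nat} (hjk : j ≤ k) :
    Jval pL lens j ≤ Jval pL lens k := by
  have := take_sum_mono lens h hjk
  simp only [Jval]
  have : ((j : Int)) ≤ (k : Int) := by omega
  have := take_sum_mono lens h hjk
  omega

theorem Jval_one_add (pL : Int) (lens : List Int) (c : Nat) :
    Jval pL lens (1 + c) = Jval pL lens 1 + ((lens.drop 1).take c).sum + 2 * c := by
  simp only [Jval, List.take_add]
  rw [List.sum_append]
  push_cast
  ring

theorem innerCount_le (w : Int) : ∀ (ls : List Int) (cur : Int), innerCount w cur ls ≤ ls.length := by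
  intro ls
  induction ls with
  | nil => intro cur; simp [innerCount]
  | cons l t ih =>
    intro cur
    rw [innerCount]
    split
    · have := ih (cur + 2 + l); simp; omega
    · simp

theorem innerCount_spec (w : Int) :
    ∀ (ls : List Int) (cur : Int),
      (0 < innerCount w cur ls →
        cur + (ls.take (innerCount w cur ls)).sum + 2 * (innerCount w cur ls : Int) ≤ w) ∧
      (innerCount w cur ls < ls.length →
        w < cur + (ls.take (innerCount w cur ls + 1)).sum + 2 * ((innerCount w cur ls : Int) + 1)) := by
  intro ls
  induction ls with
  | nil => intro cur; simp [innerCount]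
  | cons l t ih =>
    intro cur
    rw [innerCount]
    split
    · rename_i hc
      have iht := ih (cur + 2 + l)
      constructor
      · intro _
        rcases Nat.eq_zero_or_pos (innerCount w (cur + 2 + l) t) with h0 | h0
        · simp [h0]; omega
        · have := iht.1 h0
          simp [Nat.add_comm 1]
          push_cast at this ⊢
          omega
      · intro hlt
        simp at hlt
        have := iht.2 (by omega)
        simp [Nat.add_comm 1]
        push_cast at this ⊢
        omega
    · rename_i hc
      constructor
      · intro h; simp at h
      · intro _
        simp
        omega

theorem innerTotal_facts (w pL : Int) (lens : List Int) (hne : lens ≠ [])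
    (h : ∀ l ∈ lens, 0 ≤ l) :
    1 ≤ innerTotal w pL lens ∧ innerTotal w pL lens ≤ lens.length ∧
      (Jval pL lens (innerTotal w pL lens) ≤ w ∨ innerTotal w pL lens = 1) ∧
      (innerTotal w pL lens < lens.length → w < Jval pL lens (innerTotal w pL lens + 1)) := by
  match lens, hne with
  | l :: t, _ =>
    have hJ1 : Jval pL (l :: t) 1 = pL + l := by simp [Jval]
    rw [innerTotal]
    split
    · rename_i hb
      refine ⟨le_refl _, by simp, Or.inr rfl, ?_⟩
      intro hlt
      have h12 : Jval pL (l :: t) 1 ≤ Jval pL (l :: t) (1 + 1) := Jval_mono pL _ h (by omega)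
      omega
    · rename_i hb
      push_neg at hb
      have hct : (l :: t).drop 1 = t := by simp
      have hoff : ∀ k : Nat, Jval pL (l :: t) (1 + k) = (pL + l) + (t.take k).sum + 2 * k := by
        intro k
        rw [Jval_one_add, hJ1, hct]
      have hspec := innerCount_spec w t (pL + l)
      have hle := innerCount_le w t (pL + l)
      refine ⟨by omega, by simp; omega, ?_, ?_⟩
      · rcases Nat.eq_zero_or_pos (innerCount w (pL + l) t) with h0 | h0
        · right; omega
        · left
          rw [hoff]
          have := hspec.1 h0
          push_cast
          omega
      · intro hlt
        simp at hlt
        have := hspec.2 (by omega)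
        rw [show 1 + innerCount w (pL + l) t + 1 = 1 + (innerCount w (pL + l) t + 1) from by omega,
          hoff]
        push_cast at this ⊢
        omega
def backCount (w pL : Int) (lens : List Int) (m : Nat) : Nat :=
  if 1 < m ∧ w < Jval pL lens m + 3 then backCount w pL lens (m - 1) else m
termination_by m
decreasing_by rename_i h; omega

theorem backCount_facts (w pL : Int) (lens : List Int) :
    ∀ m : Nat, 1 ≤ m →
      1 ≤ backCount w pL lens m ∧ backCount w pL lens m ≤ m ∧
        (Jval pL lens (backCount w pL lens m) + 3 ≤ w ∨ backCount w pL lens m = 1) ∧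
        (backCount w pL lens m < m → w < Jval pL lens (backCount w pL lens m + 1) + 3) := by
  intro m
  fun_induction backCount with
  | case1 m h ih =>
    intro _
    obtain ⟨h1, h2, h3, h4⟩ := ih (by omega)
    refine ⟨h1, by omega, h3, ?_⟩
    intro _
    rcases Nat.lt_or_ge (backCount w pL lens (m - 1)) (m - 1) with hlt | hge
    · exact h4 hlt
    · have : backCount w pL lens (m - 1) = m - 1 := by omega
      rw [this, show m - 1 + 1 = m from by omega]
      exact h.2
  | case2 m h =>
    intro hm
    rcases Nat.eq_or_lt_of_le hm with h1 | h1
    · exact ⟨hm, le_refl _, Or.inr h1.symm, by omega⟩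
    · have : ¬ w < Jval pL lens m + 3 := fun hw => h ⟨h1, hw⟩
      exact ⟨hm, le_refl _, Or.inl (by omega), by omega⟩

theorem back_spec (w : Int) (pfx : List Char) (rem : List (List Char)) :
    ∀ m : Nat, 1 ≤ m → m ≤ rem.length →
      wdBack w pfx (rem.take m) (pfx ++ wdJoin (rem.take m)) (rem.drop m) =
        (pfx ++ wdJoin (rem.take (backCount w (pfx.length : Int)
            (rem.map (fun s => (s.length : Int))) m)),
         rem.drop (backCount w (pfx.length : Int)
            (rem.map (fun s => (s.length : Int))) m)) := by
  intro m
  induction m using Nat.strong_induction_on with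
  | _ m ih =>
    intro hm1 hmn
    have htl : (rem.take m).length = m := by simp; omega
    rw [wdBack, backCount]
    by_cases hg : 1 < m ∧ w < Jval (pfx.length : Int) (rem.map (fun s => (s.length : Int))) m + 3
    · have hg' : 1 < (rem.take m).length ∧
          w < (((pfx ++ wdJoin (rem.take m)).length : Int)) + 3 := by
        rw [htl, line_len pfx rem m hm1 hmn]
        exact hg
      rw [if_pos hg', if_pos hg]
      have hdl : (rem.take m).dropLast = rem.take (m - 1) := by
        rw [List.dropLast_eq_take, htl, List.take_take]
        congr 1
        omega
      have hm1n : m - 1 < rem.length := by omega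
      have hgl : (rem.take m).getLast?.toList ++ rem.drop m = rem.drop (m - 1) := by
        rw [List.getLast?_eq_getElem?, htl]
        rw [List.getElem?_take, if_pos (by omega : m - 1 < m)]
        rw [List.getElem?_eq_getElem hm1n]
        simp only [Option.toList_some, List.singleton_append]
        rw [List.drop_eq_getElem_cons hm1n, show m - 1 + 1 = m from by omega]
      rw [hdl, hgl]
      exact ih (m - 1) (by omega) (by omega) (by omega)
    · have hg' : ¬ (1 < (rem.take m).length ∧
          w < (((pfx ++ wdJoin (rem.take m)).length : Int)) + 3) := by
        rw [htl, line_len pfx rem m hm1 hmn]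
        exact hg
      rw [if_neg hg', if_neg hg]
theorem wdTakeGo_spec (w : Int) :
    ∀ (ls : List Int) (cur : Int) (k : Nat),
      ∃ c : Nat, wdTakeGo w cur k ls = k + c ∧ c ≤ ls.length ∧
        (0 < c → cur + (ls.take c).sum + 2 * (c : Int) + 3 ≤ w) ∧
        (c < ls.length → w < cur + (ls.take (c + 1)).sum + 2 * ((c : Int) + 1) + 3) := by
  intro ls
  induction ls with
  | nil => intro cur k; exact ⟨0, by simp [wdTakeGo], by simp, by simp, by simp⟩
  | cons l t ih =>
    intro cur k
    rw [wdTakeGo]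
    split
    · rename_i hc
      refine ⟨0, by omega, by simp, by simp, ?_⟩
      intro _
      simp
      omega
    · rename_i hc
      push_neg at hc
      obtain ⟨c', hval, hle, h1, h2⟩ := ih (cur + 2 + l) (k + 1)
      refine ⟨c' + 1, by omega, by simp; omega, ?_, ?_⟩
      · intro _
        rcases Nat.eq_zero_or_pos c' with h0 | h0
        · simp [h0]; omega
        · have := h1 h0
          simp [List.take_succ_cons]
          push_cast at this ⊢
          omega
      · intro hlt
        simp at hlt
        have := h2 (by omega)
        simp [List.take_succ_cons]
        push_cast at this ⊢
        omega

theorem takeLine_facts (w pL : Int) (lens : List Int) (hne : lens ≠ [])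
    (hC : ¬ (lens.length = 1 ∨ pL + lens.sum + 2 * ((lens.length : Int) - 1) ≤ w)) :
    (wdTakeLine w pL lens).2 = true ∧ 1 ≤ (wdTakeLine w pL lens).1 ∧
      (wdTakeLine w pL lens).1 ≤ lens.length ∧
      (Jval pL lens (wdTakeLine w pL lens).1 + 3 ≤ w ∨ (wdTakeLine w pL lens).1 = 1) ∧
      ((wdTakeLine w pL lens).1 < lens.length →
        w < Jval pL lens ((wdTakeLine w pL lens).1 + 1) + 3) := by
  match lens, hne, hC with
  | l :: t, _, hC =>
    rw [wdTakeLine.eq_def, if_neg hC]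
    simp only
    have hJ1 : Jval pL (l :: t) 1 = pL + l := by simp [Jval]
    have hoff : ∀ k : Nat, Jval pL (l :: t) (1 + k) = (pL + l) + (t.take k).sum + 2 * k := by
      intro k
      rw [Jval_one_add, hJ1]
      simp
    obtain ⟨c, hval, hle, h1, h2⟩ := wdTakeGo_spec w t (pL + l) 1
    rw [hval]
    refine ⟨by trivial, by omega, by simp; omega, ?_, ?_⟩
    · rcases Nat.eq_zero_or_pos c with h0 | h0
      · right; omega
      · left
        rw [hoff]
        have := h1 h0
        push_cast at this ⊢
        omega
    · intro hlt
      simp at hlt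
      have := h2 (by omega)
      rw [show 1 + c + 1 = 1 + (c + 1) from by omega, hoff]
      push_cast at this ⊢
      omega

theorem P_unique (w pL : Int) (lens : List Int) (hnn : ∀ l ∈ lens, 0 ≤ l) :
    ∀ k₁ k₂ : Nat,
      (1 ≤ k₁ ∧ k₁ ≤ lens.length ∧ (Jval pL lens k₁ + 3 ≤ w ∨ k₁ = 1) ∧
        (k₁ < lens.length → w < Jval pL lens (k₁ + 1) + 3)) →
      (1 ≤ k₂ ∧ k₂ ≤ lens.length ∧ (Jval pL lens k₂ + 3 ≤ w ∨ k₂ = 1) ∧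
        (k₂ < lens.length → w < Jval pL lens (k₂ + 1) + 3)) →
      k₁ = k₂ := by
  have key : ∀ k₁ k₂ : Nat,
      (1 ≤ k₁ ∧ k₁ ≤ lens.length ∧ (Jval pL lens k₁ + 3 ≤ w ∨ k₁ = 1) ∧
        (k₁ < lens.length → w < Jval pL lens (k₁ + 1) + 3)) →
      (1 ≤ k₂ ∧ k₂ ≤ lens.length ∧ (Jval pL lens k₂ + 3 ≤ w ∨ k₂ = 1) ∧
        (k₂ < lens.length → w < Jval pL lens (k₂ + 1) + 3)) →
      k₁ < k₂ → False := by
    intro k₁ k₂ h₁ h₂ hlt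
    have hk2 : Jval pL lens k₂ + 3 ≤ w := by
      rcases h₂.2.2.1 with h | h
      · exact h
      · omega
    have hk1n : k₁ < lens.length := by omega
    have := h₁.2.2.2 hk1n
    have hmono : Jval pL lens (k₁ + 1) ≤ Jval pL lens k₂ := Jval_mono pL lens hnn (by omega)
    omega
  intro k₁ k₂ h₁ h₂
  rcases lt_trichotomy k₁ k₂ with h | h | h
  · exact absurd h (fun hh => key k₁ k₂ h₁ h₂ hh)
  · exact h
  · exact absurd h (fun hh => key k₂ k₁ h₂ h₁ hh)
theorem main_step_eq (width : Int) (pfx : List Char) (rem : List (List Char)) (hrem : rem ≠ []) :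
    wdStep width pfx rem =
      ((pfx ++ wdJoin (rem.take (wdTakeLine width (pfx.length : Int)
          (rem.map (fun s => (s.length : Int)))).1)) ++
        (if (wdTakeLine width (pfx.length : Int) (rem.map (fun s => (s.length : Int)))).2
          then [',', ' ', '&'] else []),
       rem.drop (wdTakeLine width (pfx.length : Int) (rem.map (fun s => (s.length : Int)))).1) := by
  obtain ⟨x, rest, rfl⟩ := List.exists_cons_of_ne_nil hrem
  set lens := (x :: rest).map (fun s => (s.length : Int)) with hlens
  set pL := ((pfx.length : Nat) : Int) with hpL
  have hlensne : lens ≠ [] := by rw [hlens]; simp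
  have hnn : ∀ l ∈ lens, 0 ≤ l := by
    intro l hl
    rw [hlens] at hl
    obtain ⟨s, _, rfl⟩ := List.mem_map.mp hl
    positivity
  have hlenlen : lens.length = (x :: rest).length := by rw [hlens]; simp
  obtain ⟨hA1, hA2, hA3, hA4⟩ := innerTotal_facts width pL lens hlensne hnn
  set mA := innerTotal width pL lens with hmA
  have hinner : wdInner width pfx [] (x :: rest) =
      ((x :: rest).take mA, (x :: rest).drop mA) := inner_top width pfx x rest
  by_cases hfin : lens.length = 1 ∨ pL + lens.sum + 2 * ((lens.length : Int) - 1) ≤ width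
  · -- last line: all remaining items go on it, no continuation
    have hJn : Jval pL lens lens.length = pL + lens.sum + 2 * ((lens.length : Int) - 1) := by
      simp [Jval]
    have hmAn : mA = lens.length := by
      rcases hfin with h1 | h1
      · omega
      · by_contra hne'
        have hlt : mA < lens.length := by omega
        have h4 := hA4 hlt
        have hmono : Jval pL lens (mA + 1) ≤ Jval pL lens lens.length :=
          Jval_mono pL lens hnn (by omega)
        omega
    have htL : wdTakeLine width pL lens = (lens.length, false) := by
      rw [wdTakeLine.eq_def, if_pos hfin]
    have hdrop : (x :: rest).drop mA = [] := by
      rw [hmAn, hlenlen]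
      simp
    have htake : (x :: rest).take mA = x :: rest := by
      rw [hmAn, hlenlen]
      simp
    simp only [wdStep, hinner, htL]
    rw [← hmAn]
    simp [htake, hdrop]
  · -- continued line
    have hn1 : (1:Nat) ≤ lens.length := by rw [hlenlen]; simp
    have hn2 : 2 ≤ lens.length := by
      rcases Nat.eq_or_lt_of_le hn1 with h1 | h1
      · exact absurd (Or.inl h1.symm) hfin
      · omega
    have hJbig : width < Jval pL lens lens.length := by
      have : ¬ pL + lens.sum + 2 * ((lens.length : Int) - 1) ≤ width := fun h => hfin (Or.inr h)
      simp only [Jval, List.take_length]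
      omega
    have hmAlt : mA < lens.length := by
      rcases hA3 with h | h
      · by_contra h'
        have he : mA = lens.length := by omega
        rw [he] at h
        omega
      · omega
    have hdropne : ((x :: rest).drop mA).isEmpty = false := by
      have hlc : (x :: rest).length = rest.length + 1 := by simp
      simp [List.drop_eq_nil_iff]
      omega
    obtain ⟨hB0, hB1, hB2, hB3, hB4⟩ := takeLine_facts width pL lens hlensne hfin
    obtain ⟨hb1, hb2, hb3, hb4⟩ := backCount_facts width pL lens mA hA1
    set m' := backCount width pL lens mA with hm'
    set kB := (wdTakeLine width pL lens).1 with hkB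
    have hP4 : m' < lens.length → width < Jval pL lens (m' + 1) + 3 := by
      intro _
      rcases Nat.lt_or_ge m' mA with hlt | hge
      · exact hb4 hlt
      · have he : m' = mA := by omega
        have := hA4 (by omega)
        rw [he]
        omega
    have hkey : m' = kB :=
      P_unique width pL lens hnn m' kB ⟨hb1, by omega, hb3, hP4⟩ ⟨hB1, hB2, hB3, hB4⟩
    have hback := back_spec width pfx (x :: rest) mA hA1 (by omega)
    simp only [wdStep, hinner, hdropne, Bool.false_eq_true, if_false]
    rw [hback]
    have hkey' : backCount width ((pfx.length : Int))
        (List.map (fun s => (s.length : Int)) (x :: rest)) mA = kB := hkey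
    rw [hkey', hB0]
    simp

theorem outer_eq (width : Int) (fp cp : List Char) :
    ∀ (n : Nat) (rem : List (List Char)), rem.length ≤ n → ∀ (first : Bool) (out : List (List Char)),
      wdOuter width fp cp rem first out =
        out ++ wdPass2 cp
          (wdPass1 width (cp.length : Int) (((if first then fp else cp).length : Int))
            (rem.map (fun s => (s.length : Int))))
          rem (if first then fp else cp) := by
  intro n
  induction n with
  | zero =>
    intro rem hlen first out
    have : rem = [] := by cases rem <;> simp_all
    subst this
    simp [wdOuter, wdPass1, wdPass2]
  | succ n ih =>
    intro rem hlen first out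
    match rem with
    | [] => simp [wdOuter, wdPass1, wdPass2]
    | r :: rest =>
      rw [wdOuter]
      set pfx := if first then fp else cp with hpfx
      have hstep := main_step_eq width pfx (r :: rest) (by simp)
      have hlt := wdStep_len width pfx (r :: rest) (by simp)
      rw [ih _ (by simp at hlt hlen ⊢; omega) false (_ ++ [(wdStep width pfx (r :: rest)).1])]
      have h1 : wdPass1 width (cp.length : Int) (pfx.length : Int)
            ((r :: rest).map (fun s => (s.length : Int)))
          = wdTakeLine width (pfx.length : Int) ((r :: rest).map (fun s => (s.length : Int))) ::
            wdPass1 width (cp.length : Int) (cp.length : Int)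
              (((r :: rest).map (fun s => (s.length : Int))).drop
                (wdTakeLine width (pfx.length : Int) ((r :: rest).map (fun s => (s.length : Int)))).1) := by
        rw [wdPass1]; simp
      rw [h1]
      simp only [wdPass2, hstep, List.map_drop, List.append_assoc, List.singleton_append]
      cases hc : (wdTakeLine width (pfx.length : Int)
          ((r :: rest).map (fun s => (s.length : Int)))).2 <;> simp

-- ===== VERDICT (by name: the statement is the Claim_ definition above) =====
theorem wrap_decl_py_spec : Claim_equal_wrap_decl_py := by
  intro indent lhs items width cei _
  unfold Spec_wrap_decl_py wrap_decl_py wrap_decl_py_alt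
  dsimp only
  rw [outer_eq width _ _ (items.map String.toList).length _ (le_refl _) true]
  simp [List.map_map, Function.comp_def]
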